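-- pv_equiv track=rewrite | github.com/BaerKun/py-games | word_games/程咬金的奇幻冒险/程咬金的奇幻冒险.勇闯鸡窝.py | Del
-- ===== SOURCE A (Python) =====
-- def Del(X):  # 清理
--     y = []
--     for a in X:
--         if X[a] == 0:
--             y += [a]
--     for b in y:
--         del X[b]
--     return X
-- ===== SOURCE B (Python) =====
-- def Del(X):  # 清理
--     # Rotate the dict as a queue: pop the front entry len(X) times,
--     # re-appending it at the back iff its value is non-zero.
--     # Kept entries keep their relative order, so the result equals A's.
--     for _ in range(len(X)):
--         a = next(iter(X))
--         v = X.pop(a)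
--         if v != 0:
--             X[a] = v
--     return X
-- ===== Notes on version B (the rewrite author's own statement) =====
-- stated objective: alternative
-- what changed: B keeps no auxiliary key list at all: it treats the dict as a FIFO queue and rotates it len(X) times, popping the front entry and re-appending it at the back only if its value is non-zero, so zero entries vanish and kept entries retain their order; A instead collects the zero-valued keys in a list and then deletes them one by one.
import Mathlib
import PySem

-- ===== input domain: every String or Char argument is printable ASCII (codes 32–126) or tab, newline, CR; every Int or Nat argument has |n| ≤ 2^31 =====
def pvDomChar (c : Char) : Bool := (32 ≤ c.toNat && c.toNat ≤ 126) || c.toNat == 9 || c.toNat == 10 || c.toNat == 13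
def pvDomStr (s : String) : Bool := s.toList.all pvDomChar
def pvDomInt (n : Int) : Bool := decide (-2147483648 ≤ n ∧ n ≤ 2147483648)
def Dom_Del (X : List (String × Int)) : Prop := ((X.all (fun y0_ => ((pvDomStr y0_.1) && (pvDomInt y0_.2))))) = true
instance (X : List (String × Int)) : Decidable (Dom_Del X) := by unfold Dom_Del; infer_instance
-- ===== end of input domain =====

-- B removes zero-valued entries without any auxiliary key list: it rotates the dict as a
-- FIFO queue len(X) times, popping the front entry and re-appending it iff non-zero,
-- whereas A collects the zero-valued keys and deletes them one by one; objective: alternative.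
-- Both A and B mutate the dict argument in place and return it; the in-place effect is the
-- returned value itself, so the return-value equivalence proved here covers it.

-- ===== PORT A =====
def Del (X : List (String × Int)) : List (String × Int) :=
  let d := PySem.Dict.mk X
  -- y = []; for a in X: if X[a] == 0: y += [a]
  -- (X[a] ported as d.get? a: a is drawn from d's keys, so the lookup never raises)
  let y := d.keys.foldl (fun y a => if d.get? a == some 0 then y ++ [a] else y) ([] : List String)
  -- for b in y: del X[b]
  (y.foldl (fun d b => PySem.Dict.erase d b) d).items

-- ===== PORT B =====
-- one loop iteration: a = next(iter(X)); v = X.pop(a); if v != 0: X[a] = v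
-- (a is the first key, so X.pop(a) returns the head value and removes it = erase; the
-- dict is never empty while iterations remain, the [] branch is unreachable)
def delRot (d : PySem.Dict String Int) : PySem.Dict String Int :=
  match d.items with
  | [] => d
  | (a, v) :: _ => if v != 0 then (d.erase a).insert a v else d.erase a

def Del_alt (X : List (String × Int)) : List (String × Int) :=
  -- for _ in range(len(X)): <delRot>
  ((PySem.List.pyRange 0 (PySem.Dict.mk X).size 1).foldl (fun d _ => delRot d)
    (PySem.Dict.mk X)).items

-- ===== PRECONDITION & SPEC =====
-- Pre_ excludes association lists with duplicate keys: they do not correspond to a Python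
-- dict argument (dict construction collapses duplicates), so the Lean representation of the
-- input is ambiguous there; both Pythons agree on every actual dict.
def Pre_Del (X : List (String × Int)) : Prop := (X.map Prod.fst).Nodup
instance (X : List (String × Int)) : Decidable (Pre_Del X) := by unfold Pre_Del; infer_instance
def pvWitness_Del : (List (String × Int)) := [("a", 0), ("b", 2)]
def Spec_Del (X : List (String × Int)) (out : List (String × Int)) : Prop := out = Del_alt X
instance (X : List (String × Int)) (out : List (String × Int)) : Decidable (Spec_Del X out) := by unfold Spec_Del; infer_instance

-- ===== CLAIM (what is proved, stated in full; the proofs are below) =====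
def Claim_equal_Del : Prop := ∀ (X : List (String × Int)), Dom_Del X → Pre_Del X → Spec_Del X (Del X)

-- ===== LEMMAS AND PROOFS =====

-- A side: folding `del X[b]` over a list of keys filters all of them out of the items list
theorem items_foldl_erase (ks : List String) (d : PySem.Dict String Int) :
    (ks.foldl (fun d b => PySem.Dict.erase d b) d).items
      = d.items.filter (fun p => !(ks.contains p.1)) := by
  induction ks generalizing d with
  | nil => simp
  | cons k ks ih =>
    rw [List.foldl_cons, ih]
    simp [PySem.Dict.erase, List.filter_filter]
    apply List.filter_congr
    intro p _
    by_cases h : p.1 = k <;> simp [h]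

-- A's result is the input with its zero-valued entries filtered out
theorem Del_eq_filter (X : List (String × Int)) (hpre : (X.map Prod.fst).Nodup) :
    Del X = X.filter (fun p => p.2 != 0) := by
  unfold Del
  simp only []
  rw [PySem.List.foldl_append_if_eq_filter, items_foldl_erase]
  apply List.filter_congr
  intro p hp
  have hnd : (PySem.Dict.mk X).keys.Nodup := by simpa [PySem.Dict.keys_mk] using hpre
  have hv : (PySem.Dict.mk X).get? p.1 = some p.2 :=
    PySem.Dict.get?_of_mem_items (PySem.Dict.mk X) (k := p.1) (v := p.2) (by simpa using hp) hnd
  have hmem : p.1 ∈ X.map Prod.fst := List.mem_map_of_mem hp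
  simp [List.contains_eq_mem, List.mem_filter, hv, hmem]
  by_cases h0 : p.2 = 0 <;> simp [h0]

-- B side: rotation invariant — after |r| more rotations of a dict whose items are
-- (still to process) r followed by the kept part of the already-processed l,
-- the items are the filtered l ++ r
theorem rot_invariant (r l : List (String × Int))
    (h : ((l ++ r).map Prod.fst).Nodup) (d : PySem.Dict String Int)
    (hd : d.items = r ++ l.filter (fun p => p.2 != 0)) :
    (delRot^[r.length] d).items = (l ++ r).filter (fun p => p.2 != 0) := by
  induction r generalizing l d with
  | nil => simpa [List.filter_append] using hd
  | cons av r ih =>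
    obtain ⟨a, v⟩ := av
    rw [List.length_cons, Function.iterate_succ_apply]
    have hstep : delRot d = if v != 0 then (d.erase a).insert a v else d.erase a := by
      unfold delRot; rw [hd]; rfl
    -- key a occurs nowhere else: not in r, not in l
    have hnr : a ∉ r.map Prod.fst ∧ a ∉ l.map Prod.fst := by
      simp only [List.map_append, List.map_cons, List.nodup_append, List.nodup_cons] at h
      exact ⟨h.2.1.1, fun hl => h.2.2 a hl a (by simp) rfl⟩
    have herase : (d.erase a).items = r ++ l.filter (fun p => p.2 != 0) := by
      simp only [PySem.Dict.erase, hd, List.filter_append, List.cons_append, List.filter_cons]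
      have h1 : ∀ p ∈ r, (!(p.1 == a)) = true := by
        intro p hp
        have : p.1 ≠ a := fun he => hnr.1 (he ▸ List.mem_map_of_mem hp)
        simp [this]
      have h2 : ∀ p ∈ l.filter (fun p => p.2 != 0), (!(p.1 == a)) = true := by
        intro p hp
        have : p.1 ≠ a := fun he => hnr.2 (he ▸ List.mem_map_of_mem (List.mem_of_mem_filter hp))
        simp [this]
      rw [List.filter_eq_self.mpr h1, List.filter_eq_self.mpr h2]
      simp
    have hnotc : (d.erase a).contains a = false := by
      rw [PySem.Dict.contains_eq_decide_mem_keys]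
      simp only [PySem.Dict.keys, herase, decide_eq_false_iff_not, List.map_append,
        List.mem_append, List.mem_map]
      rintro (⟨p, hp, he⟩ | ⟨p, hp, he⟩)
      · exact hnr.1 (he ▸ List.mem_map_of_mem hp)
      · exact hnr.2 (he ▸ List.mem_map_of_mem (List.mem_of_mem_filter hp))
    have hnext : (delRot d).items = r ++ (l ++ [(a, v)]).filter (fun p => p.2 != 0) := by
      rw [hstep]
      by_cases h0 : v = 0
      · simp [h0, herase, List.filter_append]
      · rw [if_pos (by simp [h0]), PySem.Dict.items_insert_of_not_contains _ _ hnotc,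
          herase]
        simp [List.filter_append, h0]
    have heq : (l ++ [(a, v)]) ++ r = l ++ (a, v) :: r := by simp
    have := ih (l ++ [(a, v)]) (by rw [heq]; exact h) (delRot d) hnext
    rw [this, heq]

-- B's result is the same filter
theorem Del_alt_eq_filter (X : List (String × Int)) (hpre : (X.map Prod.fst).Nodup) :
    Del_alt X = X.filter (fun p => p.2 != 0) := by
  unfold Del_alt
  rw [List.foldl_const]
  have hlen : (PySem.List.pyRange 0 ((PySem.Dict.mk X).size) 1).length = X.length := by
    rw [PySem.List.length_pyRange_one]
    simp [PySem.Dict.size]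
  rw [hlen]
  simpa using rot_invariant X [] (by simpa using hpre) (PySem.Dict.mk X) (by simp)

-- ===== VERDICT (by name: the statement is the Claim_ definition above) =====
theorem Del_spec : Claim_equal_Del := by
  intro X _ hpre
  unfold Spec_Del
  rw [Del_eq_filter X hpre, Del_alt_eq_filter X hpre]
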